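-- pv_equiv track=rewrite | github.com/HappyRish01/CollegeAssignment | Q6.py | sum_and_product_of_digits
-- ===== SOURCE A (Python) =====
-- def sum_and_product_of_digits(a):
--     n = abs(a)
--     digit_sum = 0
--     digit_product = 1
--
--     if n == 0:
--         digit_product = 0
--
--     while n > 0:
--         digit = n % 10
--         digit_sum += digit
--         digit_product *= digit
--         n //= 10
--
--     return digit_sum, digit_product
-- ===== SOURCE B (Python) =====
-- def sum_and_product_of_digits(a):
--     n = abs(a)
--     if n < 10:
--         return n, n
--     q, d = divmod(n, 10)
--     s, p = sum_and_product_of_digits(q)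
--     return s + d, p * d
-- ===== Notes on version B (the rewrite author's own statement) =====
-- stated objective: alternative
-- what changed: Replaces A's iterative while-loop with two accumulators (and an explicit n==0 special case for the product) by structural recursion on the quotient: the single-digit base case returns (n, n), which makes the zero case fall out naturally, and each step combines the last digit with the recursive result.
import Mathlib
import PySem

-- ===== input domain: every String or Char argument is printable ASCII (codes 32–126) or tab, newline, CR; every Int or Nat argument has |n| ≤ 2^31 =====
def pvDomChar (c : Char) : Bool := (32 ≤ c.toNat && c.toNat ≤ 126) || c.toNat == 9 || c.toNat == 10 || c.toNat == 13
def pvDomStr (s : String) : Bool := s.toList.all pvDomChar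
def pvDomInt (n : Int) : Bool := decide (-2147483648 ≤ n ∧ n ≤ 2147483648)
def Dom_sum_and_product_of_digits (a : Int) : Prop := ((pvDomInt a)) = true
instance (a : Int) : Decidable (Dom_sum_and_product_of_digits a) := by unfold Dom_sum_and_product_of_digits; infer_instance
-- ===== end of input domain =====

-- B replaces A's accumulator while-loop (with its explicit n==0 product fix-up) by direct
-- recursion on n // 10 with base case (n, n) for single-digit n; same asymptotic cost.

-- ===== PORT A =====
-- A's while loop over n = |a| with accumulators digit_sum, digit_product; n ≥ 0 throughout,
-- so Nat's % and / are exactly Python's % and // here.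
def pvLoopA (n : Nat) (s p : Int) : Int × Int :=
  if 0 < n then
    pvLoopA (n / 10) (s + ((n % 10 : Nat) : Int)) (p * ((n % 10 : Nat) : Int))
  else (s, p)
decreasing_by exact Nat.div_lt_self (by omega) (by omega)

def sum_and_product_of_digits (a : Int) : Int × Int :=
  let n := a.natAbs
  let p0 : Int := if n = 0 then 0 else 1
  pvLoopA n 0 p0

-- ===== PORT B =====
def pvRecB (n : Nat) : Int × Int :=
  if n < 10 then ((n : Int), (n : Int))
  else
    let d : Int := ((n % 10 : Nat) : Int)
    let sp := pvRecB (n / 10)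
    (sp.1 + d, sp.2 * d)
decreasing_by exact Nat.div_lt_self (by omega) (by omega)

def sum_and_product_of_digits_alt (a : Int) : Int × Int := pvRecB a.natAbs

-- ===== PRECONDITION & SPEC =====
def Spec_sum_and_product_of_digits (a : Int) (out : Int × Int) : Prop := out = sum_and_product_of_digits_alt a
instance (a : Int) (out : Int × Int) : Decidable (Spec_sum_and_product_of_digits a out) := by unfold Spec_sum_and_product_of_digits; infer_instance

-- ===== CLAIM (what is proved, stated in full; the proofs are below) =====
def Claim_equal_sum_and_product_of_digits : Prop := ∀ (a : Int), Dom_sum_and_product_of_digits a → Spec_sum_and_product_of_digits a (sum_and_product_of_digits a)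

-- ===== LEMMAS AND PROOFS =====
theorem pvLoopA_eq_recB (n : Nat) : ∀ s p : Int, 0 < n →
    pvLoopA n s p = (s + (pvRecB n).1, p * (pvRecB n).2) := by
  induction n using Nat.strong_induction_on with
  | _ n ih =>
    intro s p hn
    rw [pvLoopA, if_pos hn]
    by_cases h10 : n < 10
    · have hq : n / 10 = 0 := Nat.div_eq_of_lt h10
      rw [pvLoopA, hq, if_neg (by omega), pvRecB, if_pos h10]
      have : n % 10 = n := Nat.mod_eq_of_lt h10
      simp [this]
    · have hqpos : 0 < n / 10 := Nat.div_pos (by omega) (by omega)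
      rw [ih (n / 10) (Nat.div_lt_self hn (by omega)) _ _ hqpos]
      conv_rhs => rw [pvRecB]
      rw [if_neg h10]
      simp
      constructor <;> ring

-- ===== VERDICT (by name: the statement is the Claim_ definition above) =====
theorem sum_and_product_of_digits_spec : Claim_equal_sum_and_product_of_digits := by
  intro a _
  show pvLoopA a.natAbs 0 (if a.natAbs = 0 then (0 : Int) else 1) = pvRecB a.natAbs
  by_cases h : a.natAbs = 0
  · rw [if_pos h, h]
    rw [pvLoopA, if_neg (by omega), pvRecB, if_pos (by omega)]
    simp
  · rw [if_neg h]
    rw [pvLoopA_eq_recB a.natAbs 0 1 (by omega)]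
    simp
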